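-- pv_equiv track=rewrite | github.com/pranavgupta2603/ProjectCorona | test2.py | descending
-- ===== SOURCE A (Python) =====
-- def descending(arr):
--     desc_arr = sorted(arr, reverse = True)
--     desc_arr = list(dict.fromkeys(desc_arr))
--     person_desc = []
--     for i in range(0 , len(desc_arr)):
--         for j in range(0, len(arr)):
--             if desc_arr[i] == arr[j]:
--                 person_desc.append(j+1)
--     return(person_desc)
-- ===== SOURCE B (Python) =====
-- def descending(arr):
--     pos = {}
--     for j, v in enumerate(arr, 1):
--         pos.setdefault(v, []).append(j)
--     out = []
--     for v in sorted(pos, reverse=True):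
--         out.extend(pos[v])
--     return out
-- ===== Notes on version B (the rewrite author's own statement) =====
-- stated objective: faster
-- what changed: Replaces the rescan of the whole array for every distinct value (O(n*U)) by one pass that groups positions per value in a dict, then emits the groups in descending key order (O(n + U log U) after the sort).
import Mathlib
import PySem

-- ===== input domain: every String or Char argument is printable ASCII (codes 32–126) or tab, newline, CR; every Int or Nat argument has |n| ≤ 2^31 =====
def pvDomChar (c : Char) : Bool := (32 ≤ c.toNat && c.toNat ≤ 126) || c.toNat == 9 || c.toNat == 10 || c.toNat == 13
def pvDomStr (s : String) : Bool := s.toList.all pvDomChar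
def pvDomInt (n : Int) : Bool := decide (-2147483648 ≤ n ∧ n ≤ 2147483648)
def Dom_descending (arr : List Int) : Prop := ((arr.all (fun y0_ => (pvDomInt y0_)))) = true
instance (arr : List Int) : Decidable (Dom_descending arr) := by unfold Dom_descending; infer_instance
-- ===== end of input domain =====

-- B replaces A's rescan of the whole array for every distinct value by one grouping
-- pass over a dict plus a sort of the distinct values (objective: faster).

-- ===== PORT A =====
def descending (arr : List Int) : List Int :=
  -- desc_arr = sorted(arr, reverse=True); desc_arr = list(dict.fromkeys(desc_arr))
  let desc_arr := PySem.List.dedup (PySem.List.sorted arr (fun x => x) true)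
  -- for i in range(0, len(desc_arr)): for j in range(0, len(arr)): if desc_arr[i] == arr[j]: person_desc.append(j+1)
  (PySem.List.pyRange 0 (desc_arr.length : Int) 1).foldl (fun person_desc i =>
    (PySem.List.pyRange 0 (arr.length : Int) 1).foldl (fun person_desc j =>
      if PySem.List.pyGetD desc_arr i 0 == PySem.List.pyGetD arr j 0 then person_desc ++ [j + 1]
      else person_desc) person_desc) []

-- ===== PORT B =====
def descending_alt (arr : List Int) : List Int :=
  -- for j, v in enumerate(arr, 1): pos.setdefault(v, []).append(j)   (= pos[v] = pos.get(v, []) + [j])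
  let pos := (PySem.List.enumerate arr 1).foldl
    (fun d p => d.modify p.2 [] (fun l => l ++ [p.1])) PySem.Dict.empty
  -- for v in sorted(pos, reverse=True): out.extend(pos[v])
  (PySem.List.sorted pos.keys (fun v => v) true).foldl
    (fun out v => out ++ pos.getD v []) []

-- ===== PRECONDITION & SPEC =====
def Spec_descending (arr : List Int) (out : List Int) : Prop := out = descending_alt arr
instance (arr : List Int) (out : List Int) : Decidable (Spec_descending arr out) := by unfold Spec_descending; infer_instance

-- ===== CLAIM (what is proved, stated in full; the proofs are below) =====
def Claim_equal_descending : Prop := ∀ (arr : List Int), Dom_descending arr → Spec_descending arr (descending arr)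

-- ===== LEMMAS AND PROOFS =====

-- set(xs) (first occurrences, in order) is a sublist of xs
theorem ofList_sublist {α : Type} [BEq α] [LawfulBEq α] (xs : List α) : (PySem.Set.ofList xs).Sublist xs := by
  induction xs using List.reverseRecOn with
  | nil => simp [PySem.Set.ofList_nil]
  | append_singleton xs x ih =>
    rw [PySem.Set.ofList_append_singleton, PySem.Set.add_eq_ite]
    split
    · exact ih.trans (List.sublist_append_left xs [x])
    · exact ih.append (List.Sublist.refl [x])

-- the (index+1)-scan over range(len xs), shifted by s, as a filter of zipIdx
theorem range_filter_eq_zipIdx (xs : List Int) (v : Int) (s : Nat) :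
    ((List.range xs.length).filter (fun k => xs.getD k 0 == v)).map (fun k => ((k + s : Nat) : Int) + 1)
      = ((xs.zipIdx s).filter (fun p => p.1 == v)).map (fun p => ((p.2 : Nat) : Int) + 1) := by
  induction xs generalizing s with
  | nil => simp
  | cons x t ih =>
    have hf : ((fun k => ((k + s : Nat) : Int) + 1) ∘ Nat.succ) = (fun k => ((k + (s+1) : Nat) : Int) + 1) := by
      funext k; simp only [Function.comp]; push_cast; ring
    rw [List.zipIdx_cons, List.length_cons, List.range_succ_eq_map]
    simp only [List.filter_cons, List.getD_cons_zero, List.filter_map]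
    have h1 : List.filter ((fun k => (x :: t).getD k 0 == v) ∘ Nat.succ) (List.range t.length)
        = List.filter (fun k => t.getD k 0 == v) (List.range t.length) :=
      List.filter_congr (by intro k _; simp [Function.comp])
    rw [h1]
    by_cases hx : (x == v) = true
    · simp only [hx, if_true, List.map_cons, List.map_map, hf, ih (s+1)]
      norm_num
    · simp only [hx, Bool.false_eq_true, if_false, List.map_map, hf, ih (s+1)]

-- the group of 1-based positions of v: A's index scan = B's enumeration filter
theorem group_eq (arr : List Int) (v : Int) :
    ((PySem.List.pyRange 0 (arr.length : Int) 1).filter (fun j => v == PySem.List.pyGetD arr j 0)).map (fun j => j + 1)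
      = ((PySem.List.enumerate arr 1).filter (fun p => p.2 == v)).map (fun p => p.1) := by
  rw [PySem.List.pyRange_zero_natCast, PySem.List.enumerate_eq_zipIdx_map]
  rw [List.filter_map, List.filter_map, List.map_map, List.map_map]
  have hp1 : List.filter ((fun j => v == PySem.List.pyGetD arr j 0) ∘ (fun k : Nat => (k : Int))) (List.range arr.length)
      = List.filter (fun k => arr.getD k 0 == v) (List.range arr.length) :=
    List.filter_congr (by intro k _; simp [Function.comp, Bool.beq_comm])
  have hp2 : List.filter ((fun p : Int × Int => p.2 == v) ∘ (fun p : Int × Nat => ((1 : Int) + ↑p.2, p.1))) arr.zipIdx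
      = List.filter (fun p : Int × Nat => p.1 == v) arr.zipIdx :=
    List.filter_congr (by intro p _; simp [Function.comp])
  have hf1 : ((fun j : Int => j + 1) ∘ (fun k : Nat => (k : Int))) = (fun k : Nat => ((k + 0 : Nat) : Int) + 1) := by
    funext k; simp [Function.comp]
  have hf2 : ((fun p : Int × Int => p.1) ∘ (fun p : Int × Nat => ((1 : Int) + ↑p.2, p.1)))
      = (fun p : Int × Nat => ((p.2 : Nat) : Int) + 1) := by
    funext p; simp [Function.comp]; ring
  rw [hp1, hp2, hf1, hf2]
  exact range_filter_eq_zipIdx arr v 0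

-- A as a flatMap of per-value index scans over the distinct values in descending order
theorem descending_eq_flatMap (arr : List Int) :
    descending arr = (PySem.List.dedup (PySem.List.sorted arr (fun x => x) true)).flatMap
      (fun v => ((PySem.List.pyRange 0 (arr.length : Int) 1).filter
          (fun j => v == PySem.List.pyGetD arr j 0)).map (fun j => j + 1)) := by
  simp only [descending]
  rw [PySem.List.foldl_pyRange_zero_pyGetD' (PySem.List.dedup (PySem.List.sorted arr (fun x => x) true)) 0
    (fun acc v => (PySem.List.pyRange 0 (arr.length : Int) 1).foldl
      (fun pd j => if v == PySem.List.pyGetD arr j 0 then pd ++ [j + 1] else pd) acc) []]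
  have hin : (fun (acc : List Int) (v : Int) => (PySem.List.pyRange 0 (arr.length : Int) 1).foldl
      (fun pd j => if v == PySem.List.pyGetD arr j 0 then pd ++ [j + 1] else pd) acc)
      = (fun acc v => acc ++ ((PySem.List.pyRange 0 (arr.length : Int) 1).filter
          (fun j => v == PySem.List.pyGetD arr j 0)).map (fun j => j + 1)) := by
    funext acc v
    exact PySem.List.foldl_append_if _ _ _ _
  rw [hin, PySem.List.foldl_append_eq_flatMap, List.nil_append]

-- the keys of B's grouping dict are the distinct values of arr, in first-occurrence order
theorem keys_pos (arr : List Int) :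
    ((PySem.List.enumerate arr 1).foldl
      (fun d p => d.modify p.2 [] (fun l => l ++ [p.1])) PySem.Dict.empty).keys
      = PySem.Set.ofList arr := by
  rw [PySem.Dict.keys_foldl_modify_key (PySem.List.enumerate arr 1) (fun p => p.2) []
    (fun _ p => fun l => l ++ [p.1]) PySem.Dict.empty]
  rw [PySem.Dict.keys_empty, PySem.List.map_snd_enumerate, PySem.Set.update_nil_left]

-- B's dict lookup is the filtered enumeration
theorem getD_pos (arr : List Int) (v : Int) :
    ((PySem.List.enumerate arr 1).foldl
      (fun d p => d.modify p.2 [] (fun l => l ++ [p.1])) PySem.Dict.empty).getD v []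
      = ((PySem.List.enumerate arr 1).filter (fun p => p.2 == v)).map (fun p => p.1) := by
  have hswap : (PySem.List.enumerate arr 1).foldl
      (fun d p => d.modify p.2 [] (fun l => l ++ [p.1])) PySem.Dict.empty
      = ((PySem.List.enumerate arr 1).map Prod.swap).foldl
        (fun d q => d.modify q.1 [] (fun l => l ++ [q.2])) PySem.Dict.empty := by
    rw [List.foldl_map]; rfl
  rw [hswap, PySem.Dict.getD_foldl_modify_append, PySem.Dict.getD_empty, List.nil_append]
  rw [List.filter_map, List.map_map]
  rfl

-- sorted(distinct values, reverse=True) is dedup(sorted(arr, reverse=True))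
theorem sorted_keys_eq (arr : List Int) :
    PySem.List.sorted (PySem.Set.ofList arr) (fun v => v) true
      = PySem.List.dedup (PySem.List.sorted arr (fun x => x) true) := by
  apply PySem.List.sorted_rev_eq_of_perm_of_pairwise_gt
  · rw [PySem.List.dedup_eq_ofList]
    refine (List.perm_ext_iff_of_nodup (PySem.Set.nodup_ofList _) (PySem.Set.nodup_ofList _)).mpr ?_
    intro x
    simp [PySem.Set.mem_ofList, PySem.List.mem_sorted]
  · have hle : (PySem.List.sorted arr (fun x => x) true).Pairwise (fun a b => b ≤ a) :=
      PySem.List.sorted_pairwise_rev arr (fun x => x)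
    have hsub := ofList_sublist (PySem.List.sorted arr (fun x => x) true)
    rw [PySem.List.dedup_eq_ofList]
    have hnd : (PySem.Set.ofList (PySem.List.sorted arr (fun x => x) true)).Nodup :=
      PySem.Set.nodup_ofList _
    exact ((hle.sublist hsub).and hnd).imp (fun h => lt_of_le_of_ne h.1 h.2.symm)

-- B as the same flatMap (after rewriting keys, lookups and the key sort)
theorem descending_alt_eq_flatMap (arr : List Int) :
    descending_alt arr = (PySem.List.dedup (PySem.List.sorted arr (fun x => x) true)).flatMap
      (fun v => ((PySem.List.enumerate arr 1).filter (fun p => p.2 == v)).map (fun p => p.1)) := by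
  simp only [descending_alt]
  rw [keys_pos, sorted_keys_eq]
  simp only [getD_pos]
  rw [PySem.List.foldl_append_eq_flatMap, List.nil_append]

-- ===== VERDICT (by name: the statement is the Claim_ definition above) =====
theorem descending_spec : Claim_equal_descending := by
  intro arr _
  unfold Spec_descending
  rw [descending_eq_flatMap, descending_alt_eq_flatMap]
  congr 1
  funext v
  exact group_eq arr v
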